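-- pv_equiv track=rewrite | github.com/3dg1luk43/ha_mqtt_dash | custom_components/ha_mqtt_dash/mqtt_bridge.py | _dedupe_devices
-- ===== SOURCE A (Python) =====
-- from typing import Any, Dict, List, Optional, Set
--
-- def _dedupe_devices(devices: List[Dict[str, Any]]) -> List[Dict[str, Any]]:
--     """Return devices unique by device_id; prefer entries with GUID or a non-empty profile."""
--     by_id: Dict[str, Dict[str, Any]] = {}
--     for d in devices:
--         did = (d.get("device_id") or "").strip()
--         if not did:
--             continue
--         prev = by_id.get(did)
--         if not prev:
--             by_id[did] = d
--             continue
--         # prefer one with guid, then with profile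
--         score_prev = (1 if prev.get("guid") else 0) + (1 if (prev.get("profile") or "") else 0)
--         score_new  = (1 if d.get("guid") else 0) + (1 if (d.get("profile") or "") else 0)
--         if score_new >= score_prev:
--             by_id[did] = d
--     return list(by_id.values())
-- ===== SOURCE B (Python) =====
-- def _entry_score(d):
--     return (1 if d.get("guid") else 0) + (1 if (d.get("profile") or "") else 0)
--
-- def _dedupe_devices(devices):
--     """Two-pass: group entries by device_id, then pick each group's best-scoring entry."""
--     groups = {}
--     for d in devices:
--         did = (d.get("device_id") or "").strip()
--         if not did:
--             continue
--         groups.setdefault(did, []).append(d)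
--     result = []
--     for entries in groups.values():
--         best = entries[0]
--         for e in entries[1:]:
--             if _entry_score(e) >= _entry_score(best):
--                 best = e
--         result.append(best)
--     return result
-- ===== Notes on version B (the rewrite author's own statement) =====
-- stated objective: alternative
-- what changed: Replaces A's single-pass dict that keeps only the best-so-far entry per id with a two-pass scheme: first group all entries by stripped device_id in an ordered dict, then select each group's best-scoring entry (ties going to the last) in first-appearance order.
import Mathlib
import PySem

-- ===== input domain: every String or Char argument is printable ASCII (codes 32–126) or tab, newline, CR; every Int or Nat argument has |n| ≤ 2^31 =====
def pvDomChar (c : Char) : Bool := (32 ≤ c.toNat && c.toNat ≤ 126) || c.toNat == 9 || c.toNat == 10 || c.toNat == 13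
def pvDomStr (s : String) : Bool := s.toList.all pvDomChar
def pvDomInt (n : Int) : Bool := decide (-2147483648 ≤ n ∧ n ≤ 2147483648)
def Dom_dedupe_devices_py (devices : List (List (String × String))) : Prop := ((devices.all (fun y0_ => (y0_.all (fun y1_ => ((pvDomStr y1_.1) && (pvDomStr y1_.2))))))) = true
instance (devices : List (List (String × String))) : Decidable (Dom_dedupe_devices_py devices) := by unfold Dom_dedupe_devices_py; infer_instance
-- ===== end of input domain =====

-- B replaces A's single-pass best-so-far dict by a two-pass scheme (group by device_id,
-- then pick each group's best-scoring entry, ties to the last); objective: alternative.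

-- shared helpers: a device is a Python dict, i.e. an association list; `pvGet d k` = d.get(k)
def pvGet (d : List (String × String)) (k : String) : Option String :=
  (PySem.Dict.mk d).get? k

-- (1 if d.get("guid") else 0) + (1 if (d.get("profile") or "") else 0)
def devScore (d : List (String × String)) : Int :=
  (if (pvGet d "guid").getD "" ≠ "" then 1 else 0)
    + (if (pvGet d "profile").getD "" ≠ "" then 1 else 0)

-- ===== PORT A =====
def dedupe_devices_py (devices : List (List (String × String))) : List (List (String × String)) :=
  (devices.foldl
    (fun by_id d =>
      let did := PySem.Str.strip ((pvGet d "device_id").getD "")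
      if did = "" then by_id
      else
        match by_id.get? did with
        | none => by_id.insert did d
        | some prev =>
          if prev = [] then by_id.insert did d   -- Python's `if not prev` is also true on an empty dict
          else if devScore d ≥ devScore prev then by_id.insert did d
          else by_id)
    (PySem.Dict.empty : PySem.Dict String (List (String × String)))).values

-- ===== PORT B =====
-- best = entries[0]; for e in entries[1:]: if score(e) >= score(best): best = e
def bestOf (l : List (List (String × String))) : List (String × String) :=
  match l with
  | [] => []
  | h :: t => t.foldl (fun best e => if devScore e ≥ devScore best then e else best) h

def dedupe_devices_py_alt (devices : List (List (String × String))) : List (List (String × String)) :=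
  let groups :=
    devices.foldl
      (fun g d =>
        let did := PySem.Str.strip ((pvGet d "device_id").getD "")
        if did = "" then g
        else g.modify did [] (· ++ [d]))   -- groups.setdefault(did, []).append(d)
      (PySem.Dict.empty : PySem.Dict String (List (List (String × String))))
  groups.values.map bestOf

-- ===== PRECONDITION & SPEC =====
def Spec_dedupe_devices_py (devices : List (List (String × String))) (out : List (List (String × String))) : Prop := out = dedupe_devices_py_alt devices
instance (devices : List (List (String × String))) (out : List (List (String × String))) : Decidable (Spec_dedupe_devices_py devices out) := by unfold Spec_dedupe_devices_py; infer_instance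

-- ===== CLAIM (what is proved, stated in full; the proofs are below) =====
def Claim_equal_dedupe_devices_py : Prop := ∀ (devices : List (List (String × String))), Dom_dedupe_devices_py devices → Spec_dedupe_devices_py devices (dedupe_devices_py devices)

-- ===== LEMMAS AND PROOFS =====

-- the two loop bodies, named for the proofs (definitionally the ports' lambdas)
def stepA (by_id : PySem.Dict String (List (String × String))) (d : List (String × String)) :
    PySem.Dict String (List (String × String)) :=
  let did := PySem.Str.strip ((pvGet d "device_id").getD "")
  if did = "" then by_id
  else
    match by_id.get? did with
    | none => by_id.insert did d
    | some prev =>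
      if prev = [] then by_id.insert did d
      else if devScore d ≥ devScore prev then by_id.insert did d
      else by_id

def stepB (g : PySem.Dict String (List (List (String × String)))) (d : List (String × String)) :
    PySem.Dict String (List (List (String × String))) :=
  let did := PySem.Str.strip ((pvGet d "device_id").getD "")
  if did = "" then g
  else g.modify did [] (· ++ [d])

lemma dedupeA_eq (devices : List (List (String × String))) :
    dedupe_devices_py devices = (devices.foldl stepA PySem.Dict.empty).values := rfl

lemma dedupeB_eq (devices : List (List (String × String))) :
    dedupe_devices_py_alt devices = ((devices.foldl stepB PySem.Dict.empty).values).map bestOf := rfl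

-- the coupling invariant between A's dict and B's grouping dict
def DRel (a : PySem.Dict String (List (String × String)))
    (g : PySem.Dict String (List (List (String × String)))) : Prop :=
  a.items = g.items.map (fun p => (p.1, bestOf p.2))
    ∧ g.keys.Nodup
    ∧ ∀ p ∈ g.items, p.2 ≠ [] ∧ ∀ e ∈ p.2, e ≠ []

lemma foldl_best_mem (h : List (String × String)) (t : List (List (String × String))) :
    t.foldl (fun best e => if devScore e ≥ devScore best then e else best) h ∈ h :: t := by
  induction t generalizing h with
  | nil => simp
  | cons a t ih =>
    simp only [List.foldl_cons]
    rcases List.mem_cons.1 (ih (if devScore a ≥ devScore h then a else h)) with hm | hm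
    · rw [hm]; split <;> simp
    · simp [hm]

lemma bestOf_mem (l : List (List (String × String))) (hl : l ≠ []) : bestOf l ∈ l := by
  cases l with
  | nil => exact absurd rfl hl
  | cons h t => exact foldl_best_mem h t

lemma bestOf_append (l : List (List (String × String))) (hl : l ≠ []) (d : List (String × String)) :
    bestOf (l ++ [d]) = if devScore d ≥ devScore (bestOf l) then d else bestOf l := by
  cases l with
  | nil => exact absurd rfl hl
  | cons h t => simp [bestOf, List.foldl_append]

lemma d_ne_nil_of_did (d : List (String × String))
    (hd : PySem.Str.strip ((pvGet d "device_id").getD "") ≠ "") : d ≠ [] := by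
  intro hnil
  subst hnil
  exact hd (by decide)

lemma get?_of_items_map (a : PySem.Dict String (List (String × String)))
    (g : PySem.Dict String (List (List (String × String))))
    (h : a.items = g.items.map (fun p => (p.1, bestOf p.2))) (k : String) :
    a.get? k = (g.get? k).map bestOf := by
  simp only [PySem.Dict.get?, h, List.find?_map]
  have : ((fun p : String × List (String × String) => p.1 == k) ∘
      (fun p : String × List (List (String × String)) => (p.1, bestOf p.2)))
      = (fun p => p.1 == k) := rfl
  rw [this]
  cases g.items.find? (fun p => p.1 == k) <;> rfl

lemma step_rel (a : PySem.Dict String (List (String × String)))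
    (g : PySem.Dict String (List (List (String × String))))
    (h : DRel a g) (d : List (String × String)) : DRel (stepA a d) (stepB g d) := by
  obtain ⟨hitems, hnd, hne⟩ := h
  unfold stepA stepB
  by_cases hdid : PySem.Str.strip ((pvGet d "device_id").getD "") = ""
  · simp only [hdid, if_pos]
    exact ⟨hitems, hnd, hne⟩
  · simp only [if_neg hdid]
    have hdne : d ≠ [] := d_ne_nil_of_did d hdid
    set did := PySem.Str.strip ((pvGet d "device_id").getD "") with hdidd
    have hget : a.get? did = (g.get? did).map bestOf := get?_of_items_map a g hitems did
    have hmod : g.modify did [] (· ++ [d]) = g.insert did ((g.getD did []) ++ [d]) := rfl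
    cases hgd : g.get? did with
    | none =>
      have hga : a.get? did = none := by rw [hget, hgd]; rfl
      have hcg : g.contains did = false := by
        rw [PySem.Dict.contains_eq_isSome_get?, hgd]; rfl
      have hca : a.contains did = false := by
        rw [PySem.Dict.contains_eq_isSome_get?, hga]; rfl
      have hgetD : g.getD did [] = [] := by rw [PySem.Dict.getD_eq_get?_getD, hgd]; rfl
      rw [hga, hmod, hgetD]
      refine ⟨?_, ?_, ?_⟩
      · rw [PySem.Dict.items_insert_of_not_contains _ _ hca,
          PySem.Dict.items_insert_of_not_contains _ _ hcg, List.map_append, hitems]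
        rfl
      · exact PySem.Dict.nodup_keys_insert _ _ _ hnd
      · intro p hp
        rcases (PySem.Dict.mem_items_insert _ _ _ _).1 hp with hp1 | hp1
        · subst hp1
          exact ⟨by simp, by intro e he; simp at he; subst he; exact hdne⟩
        · exact hne p hp1.1
    | some l =>
      have hlm : (did, l) ∈ g.items := PySem.Dict.mem_items_of_get?_eq_some _ hgd
      have hlprops := hne (did, l) hlm
      have hlne : l ≠ [] := hlprops.1
      have hprev_mem : bestOf l ∈ l := bestOf_mem l hlne
      have hprev_ne : bestOf l ≠ [] := hlprops.2 _ hprev_mem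
      have hga : a.get? did = some (bestOf l) := by rw [hget, hgd]; rfl
      have hcg : g.contains did = true := by
        rw [PySem.Dict.contains_eq_isSome_get?, hgd]; rfl
      have hca : a.contains did = true := by
        rw [PySem.Dict.contains_eq_isSome_get?, hga]; rfl
      have hgetD : g.getD did [] = l := by rw [PySem.Dict.getD_eq_get?_getD, hgd]; rfl
      rw [hga, hmod, hgetD]
      simp only [if_neg hprev_ne]
      have hbapp := bestOf_append l hlne d
      have hItemsB : (g.insert did (l ++ [d])).items
          = g.items.map (fun p => if p.1 == did then (did, l ++ [d]) else p) :=
        PySem.Dict.items_insert_of_contains _ _ hcg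
      have hMemB : ∀ p ∈ (g.insert did (l ++ [d])).items, p.2 ≠ [] ∧ ∀ e ∈ p.2, e ≠ [] := by
        intro p hp
        rcases (PySem.Dict.mem_items_insert _ _ _ _).1 hp with hp1 | hp1
        · subst hp1
          refine ⟨by simp, ?_⟩
          intro e he
          rcases List.mem_append.1 he with he | he
          · exact hlprops.2 e he
          · simp at he; subst he; exact hdne
        · exact hne p hp1.1
      have hNodB : (g.insert did (l ++ [d])).keys.Nodup := PySem.Dict.nodup_keys_insert _ _ _ hnd
      by_cases hs : devScore d ≥ devScore (bestOf l)
      · simp only [if_pos hs]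
        refine ⟨?_, hNodB, hMemB⟩
        rw [PySem.Dict.items_insert_of_contains _ _ hca, hItemsB, hitems,
          List.map_map, List.map_map]
        apply List.map_congr_left
        intro p _
        simp only [Function.comp]
        by_cases hk : p.1 == did
        · simp [hk, hbapp, if_pos hs]
        · simp [hk]
      · simp only [if_neg hs]
        refine ⟨?_, hNodB, hMemB⟩
        rw [hItemsB, hitems, List.map_map]
        apply List.map_congr_left
        rintro ⟨pk, pv⟩ hp
        simp only [Function.comp]
        by_cases hk : pk == did
        · have hkeq : pk = did := eq_of_beq hk
          have hsome : g.get? pk = some pv := PySem.Dict.get?_of_mem_items g hp hnd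
          rw [hkeq, hgd] at hsome
          have hpl : pv = l := by injection hsome with hh; exact hh.symm
          simp [hbapp, if_neg hs, hkeq, hpl]
        · simp [hk]

lemma rel_foldl (devices : List (List (String × String)))
    (a : PySem.Dict String (List (String × String)))
    (g : PySem.Dict String (List (List (String × String))))
    (h : DRel a g) : DRel (devices.foldl stepA a) (devices.foldl stepB g) := by
  induction devices generalizing a g with
  | nil => exact h
  | cons d t ih => exact ih _ _ (step_rel a g h d)

-- ===== VERDICT (by name: the statement is the Claim_ definition above) =====
theorem dedupe_devices_py_spec : Claim_equal_dedupe_devices_py := by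
  intro devices _
  unfold Spec_dedupe_devices_py
  rw [dedupeA_eq, dedupeB_eq]
  have hrel : DRel (devices.foldl stepA PySem.Dict.empty) (devices.foldl stepB PySem.Dict.empty) :=
    rel_foldl devices _ _ ⟨rfl, by simp [PySem.Dict.keys_empty], by simp [PySem.Dict.empty]⟩
  simp only [PySem.Dict.values, hrel.1, List.map_map]
  rfl
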